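-- pv_equiv track=rewrite | github.com/daiwber/TSPExplorer | first_shot.py | backtrack
-- ===== SOURCE A (Python) =====
-- def backtrack(matched, odd_nodes, dist_matrix):
--     """回溯法，生成所有可能的匹配组合"""
--     if len(matched) == len(odd_nodes):
--         return [matched]
--
--     results = []
--     for i in range(len(odd_nodes)):
--         if odd_nodes[i] not in matched:
--             for j in range(i + 1, len(odd_nodes)):
--                 if odd_nodes[j] not in matched:
--                     # 尝试匹配odd_nodes[i] 和 odd_nodes[j]
--                     new_matched = matched + [odd_nodes[i], odd_nodes[j]]
--                     results += backtrack(new_matched, odd_nodes, dist_matrix)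
--
--     return results
-- ===== SOURCE B (Python) =====
-- def backtrack(matched, odd_nodes, dist_matrix):
--     """Iterative level-by-level (BFS) expansion instead of recursion; dist_matrix unused, as in A."""
--     n = len(odd_nodes)
--     level = [matched]
--     while level and len(level[0]) != n:
--         nxt = []
--         for p in level:
--             for i in range(n):
--                 if odd_nodes[i] not in p:
--                     for j in range(i + 1, n):
--                         if odd_nodes[j] not in p:
--                             nxt.append(p + [odd_nodes[i], odd_nodes[j]])
--         level = nxt
--     return level
-- ===== Notes on version B (the rewrite author's own statement) =====
-- stated objective: alternative
-- what changed: Replaces A's recursive backtracking with an iterative breadth-first expansion: a while loop that repeatedly replaces the whole level of partial matchings by all of their one-pair extensions, which yields the same results in the same order because every result sits at the same depth.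
import Mathlib
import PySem

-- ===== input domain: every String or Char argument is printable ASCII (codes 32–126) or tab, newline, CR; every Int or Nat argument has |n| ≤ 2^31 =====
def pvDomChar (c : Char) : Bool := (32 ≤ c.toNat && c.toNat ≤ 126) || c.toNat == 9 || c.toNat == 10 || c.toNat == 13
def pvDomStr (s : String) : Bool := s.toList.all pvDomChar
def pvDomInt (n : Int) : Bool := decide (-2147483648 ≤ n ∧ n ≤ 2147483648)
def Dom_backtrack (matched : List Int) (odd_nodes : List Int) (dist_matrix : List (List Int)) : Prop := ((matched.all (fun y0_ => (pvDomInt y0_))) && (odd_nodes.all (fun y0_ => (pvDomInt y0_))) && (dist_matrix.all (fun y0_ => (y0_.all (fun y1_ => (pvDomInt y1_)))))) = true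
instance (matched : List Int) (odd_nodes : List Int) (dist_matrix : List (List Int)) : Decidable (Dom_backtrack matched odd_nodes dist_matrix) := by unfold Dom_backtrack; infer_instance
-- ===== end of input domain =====

-- B replaces A's recursion by an iterative level-by-level (breadth-first) expansion of partial
-- matchings (same enumeration order, since all results sit at the same depth); objective: alternative.

-- number of positions of odd_nodes whose value is not yet in matched; used ONLY as a fuel bound
-- making the two ports total (each recursion step / loop iteration strictly decreases it)
def pvUnmatched (matched odd : List Int) : Nat :=
  (odd.filter (fun x => !matched.contains x)).length

-- ===== PORT A =====
-- literal transliteration of A; `fuel` only makes the recursion total (it is provably sufficient),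
-- range(len(odd)) → List.range, range(i+1, len(odd)) → List.range' (i+1) (len-(i+1)),
-- odd_nodes[i] → odd.getD i 0 (exact: i < odd.length on every loop index)
def backtrackFuel : Nat → List Int → List Int → List (List Int) → List (List Int)
  | 0, _, _, _ => []
  | f+1, matched, odd, dm =>
    if matched.length = odd.length then [matched]
    else
      (List.range odd.length).foldl (fun res i =>
        if !matched.contains (odd.getD i 0) then
          (List.range' (i+1) (odd.length - (i+1))).foldl (fun res2 j =>
            if !matched.contains (odd.getD j 0) then
              res2 ++ backtrackFuel f (matched ++ [odd.getD i 0, odd.getD j 0]) odd dm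
            else res2) res
        else res) []

def backtrack (matched : List Int) (odd_nodes : List Int) (dist_matrix : List (List Int)) : List (List Int) :=
  backtrackFuel (pvUnmatched matched odd_nodes + 1) matched odd_nodes dist_matrix

-- ===== PORT B =====
-- one BFS round: the three nested for-loops of Source B building `nxt`
def bStep (odd : List Int) (level : List (List Int)) : List (List Int) :=
  level.foldl (fun nxt p =>
    (List.range odd.length).foldl (fun nxt1 i =>
      if !p.contains (odd.getD i 0) then
        (List.range' (i+1) (odd.length - (i+1))).foldl (fun nxt2 j =>
          if !p.contains (odd.getD j 0) then
            nxt2 ++ [p ++ [odd.getD i 0, odd.getD j 0]]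
          else nxt2) nxt1
      else nxt1) nxt) []

-- the while-loop of Source B; `fuel` only makes it total (provably sufficient)
def bLoop : Nat → List Int → List (List Int) → List (List Int)
  | 0, _, level => level
  | f+1, odd, level =>
    match level with
    | [] => level
    | p :: _ => if p.length = odd.length then level else bLoop f odd (bStep odd level)

def backtrack_alt (matched : List Int) (odd_nodes : List Int) (dist_matrix : List (List Int)) : List (List Int) :=
  bLoop (pvUnmatched matched odd_nodes + 1) odd_nodes [matched]

-- ===== PRECONDITION & SPEC =====
def Spec_backtrack (matched : List Int) (odd_nodes : List Int) (dist_matrix : List (List Int)) (out : List (List Int)) : Prop := out = backtrack_alt matched odd_nodes dist_matrix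
instance (matched : List Int) (odd_nodes : List Int) (dist_matrix : List (List Int)) (out : List (List Int)) : Decidable (Spec_backtrack matched odd_nodes dist_matrix out) := by unfold Spec_backtrack; infer_instance

-- ===== CLAIM (what is proved, stated in full; the proofs are below) =====
def Claim_equal_backtrack : Prop := ∀ (matched : List Int) (odd_nodes : List Int) (dist_matrix : List (List Int)), Dom_backtrack matched odd_nodes dist_matrix → Spec_backtrack matched odd_nodes dist_matrix (backtrack matched odd_nodes dist_matrix)

-- ===== LEMMAS AND PROOFS =====

-- the children a partial matching p generates, in A's (and B's) traversal order
def childrenOf (odd p : List Int) : List (List Int) :=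
  (List.range odd.length).flatMap (fun i =>
    if !p.contains (odd.getD i 0) then
      (List.range' (i+1) (odd.length - (i+1))).flatMap (fun j =>
        if !p.contains (odd.getD j 0) then [p ++ [odd.getD i 0, odd.getD j 0]] else [])
    else [])

theorem foldl_ifappend {α γ : Type} (l : List α) (P : α → Bool) (g : α → List γ) (init : List γ) :
    l.foldl (fun r x => if P x then r ++ g x else r) init
      = init ++ l.flatMap (fun x => if P x then g x else []) := by
  induction l generalizing init with
  | nil => simp
  | cons a t ih => simp only [List.foldl_cons, List.flatMap_cons]; split_ifs <;> simp [ih]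

theorem A_base (f : Nat) (m odd : List Int) (dm : List (List Int)) (h : m.length = odd.length) :
    backtrackFuel (f+1) m odd dm = [m] := by
  simp [backtrackFuel, h]

theorem A_unfold (f : Nat) (m odd : List Int) (dm : List (List Int)) (h : ¬ m.length = odd.length) :
    backtrackFuel (f+1) m odd dm
      = (childrenOf odd m).flatMap (fun c => backtrackFuel f c odd dm) := by
  simp only [backtrackFuel, if_neg h, foldl_ifappend, List.nil_append, childrenOf,
    List.flatMap_assoc]
  apply List.flatMap_congr
  intro i _
  split_ifs with h1
  · rw [List.flatMap_assoc]
    apply List.flatMap_congr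
    intro j _
    split_ifs with h2 <;> simp
  · rfl

theorem bStep_eq (odd : List Int) (level : List (List Int)) :
    bStep odd level = level.flatMap (childrenOf odd) := by
  have hfun : (fun (nxt : List (List Int)) (p : List Int) =>
      (List.range odd.length).foldl (fun nxt1 i =>
        if !p.contains (odd.getD i 0) then
          (List.range' (i+1) (odd.length - (i+1))).foldl (fun nxt2 j =>
            if !p.contains (odd.getD j 0) then
              nxt2 ++ [p ++ [odd.getD i 0, odd.getD j 0]]
            else nxt2) nxt1
        else nxt1) nxt)
      = (fun nxt p => nxt ++ childrenOf odd p) := by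
    funext nxt p
    have hfun2 : (fun (nxt1 : List (List Int)) (i : Nat) =>
        if !p.contains (odd.getD i 0) then
          (List.range' (i+1) (odd.length - (i+1))).foldl (fun nxt2 j =>
            if !p.contains (odd.getD j 0) then
              nxt2 ++ [p ++ [odd.getD i 0, odd.getD j 0]]
            else nxt2) nxt1
        else nxt1)
        = (fun nxt1 i =>
        if !p.contains (odd.getD i 0) then
          nxt1 ++ (List.range' (i+1) (odd.length - (i+1))).flatMap (fun j =>
            if !p.contains (odd.getD j 0) then [p ++ [odd.getD i 0, odd.getD j 0]] else [])
        else nxt1) := by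
      funext nxt1 i
      split_ifs with h1
      · exact foldl_ifappend _ _ _ _
      · rfl
    rw [hfun2, foldl_ifappend, childrenOf]
  rw [bStep, hfun, PySem.List.foldl_append_eq_flatMap]
  simp

theorem mem_childrenOf {odd p c : List Int} (h : c ∈ childrenOf odd p) :
    ∃ a b : Int, a ∈ odd ∧ p.contains a = false ∧ c = p ++ [a, b] := by
  simp only [childrenOf, List.mem_flatMap, List.mem_range] at h
  obtain ⟨i, hi, hc⟩ := h
  by_cases h1 : (!p.contains (odd.getD i 0)) = true
  · rw [if_pos h1] at hc
    simp only [List.mem_flatMap] at hc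
    obtain ⟨j, _, hc⟩ := hc
    by_cases h2 : (!p.contains (odd.getD j 0)) = true
    · rw [if_pos h2] at hc
      simp only [List.mem_singleton] at hc
      refine ⟨odd.getD i 0, odd.getD j 0, ?_, by simpa using h1, hc⟩
      rw [List.getD_eq_getElem odd 0 hi]
      exact List.getElem_mem hi
    · rw [if_neg h2] at hc; cases hc
  · rw [if_neg h1] at hc; cases hc

theorem filter_length_lt {α : Type} (P Q : α → Bool) (himp : ∀ x, Q x = true → P x = true)
    (a : α) (hPa : P a = true) (hQa : Q a = false) :
    ∀ l : List α, a ∈ l → (l.filter Q).length < (l.filter P).length := by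
  intro l ha
  have hle : ∀ t : List α, (t.filter Q).length ≤ (t.filter P).length := by
    intro t
    rw [← List.countP_eq_length_filter, ← List.countP_eq_length_filter]
    exact List.countP_mono_left (fun x _ hx => himp x hx)
  induction l with
  | nil => cases ha
  | cons x t ih =>
    rcases List.mem_cons.mp ha with rfl | hat
    · have := hle t
      simp only [List.filter_cons, hQa, hPa]
      simp
      omega
    · have := ih hat
      simp only [List.filter_cons]
      cases hQx : Q x
      · cases hPx : P x <;> simp <;> omega
      · rw [himp x hQx]
        simp
        omega

theorem U_lt (odd p : List Int) (a b : Int) (ha : a ∈ odd) (hna : p.contains a = false) :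
    pvUnmatched (p ++ [a, b]) odd < pvUnmatched p odd := by
  unfold pvUnmatched
  apply filter_length_lt _ _ _ a _ _ _ ha
  · intro x hx
    simp only [List.contains_append, Bool.not_eq_true', Bool.or_eq_false_iff] at hx ⊢
    simp only [List.contains_eq_mem, decide_eq_false_iff_not] at hx ⊢
    exact hx.1
  · simp only [Bool.not_eq_true', List.contains_eq_mem, decide_eq_false_iff_not] at hna ⊢
    exact hna
  · simp

theorem A_irrel (f : Nat) : ∀ (f' u : Nat) (m odd : List Int) (dm : List (List Int)),
    pvUnmatched m odd ≤ u → u < f → u < f' →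
    backtrackFuel f m odd dm = backtrackFuel f' m odd dm := by
  induction f with
  | zero => intro f' u m odd dm _ h _; omega
  | succ f ih =>
    intro f' u m odd dm hu hf hf'
    match f', hf' with
    | f'+1, _ =>
      by_cases hlen : m.length = odd.length
      · rw [A_base _ _ _ _ hlen, A_base _ _ _ _ hlen]
      · rw [A_unfold _ _ _ _ hlen, A_unfold _ _ _ _ hlen]
        apply List.flatMap_congr
        intro c hc
        obtain ⟨a, b, ha, hna, rfl⟩ := mem_childrenOf hc
        have hlt := U_lt odd m a b ha hna
        exact ih f' (pvUnmatched (m ++ [a, b]) odd) _ _ _ (le_refl _) (by omega) (by omega)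

theorem bLoop_nil (f : Nat) (odd : List Int) : bLoop f odd [] = [] := by
  cases f <;> rfl

theorem bLoop_eq (f : Nat) : ∀ (u L : Nat) (level : List (List Int)) (odd : List Int) (dm : List (List Int)),
    (∀ p ∈ level, p.length = L) → (∀ p ∈ level, pvUnmatched p odd ≤ u) → u < f →
    bLoop f odd level
      = level.flatMap (fun p => backtrackFuel (pvUnmatched p odd + 1) p odd dm) := by
  induction f with
  | zero => intro u L level odd dm _ _ h; omega
  | succ f ih =>
    intro u L level odd dm hL hU hf
    match level with
    | [] => simp [bLoop]
    | p :: rest =>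
      by_cases hlen : p.length = odd.length
      · have : ∀ q ∈ p :: rest, backtrackFuel (pvUnmatched q odd + 1) q odd dm = [q] := by
          intro q hq
          exact A_base _ _ _ _ (by rw [hL q hq, ← hL p (List.mem_cons_self ..)]; exact hlen)
        rw [List.flatMap_congr this]
        simp [bLoop, hlen]
      · have hstep : bLoop (f+1) odd (p :: rest) = bLoop f odd (bStep odd (p :: rest)) := by
          simp [bLoop, hlen]
        have hlenq : ∀ q ∈ p :: rest, ¬ q.length = odd.length := by
          intro q hq
          rw [hL q hq, ← hL p (List.mem_cons_self ..)]; exact hlen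
        have hRHS : (p :: rest).flatMap (fun q => backtrackFuel (pvUnmatched q odd + 1) q odd dm)
            = ((p :: rest).flatMap (childrenOf odd)).flatMap
                (fun c => backtrackFuel (pvUnmatched c odd + 1) c odd dm) := by
          rw [List.flatMap_assoc]
          apply List.flatMap_congr
          intro q hq
          rw [A_unfold _ _ _ _ (hlenq q hq)]
          apply List.flatMap_congr
          intro c hc
          obtain ⟨a, b, ha, hna, rfl⟩ := mem_childrenOf hc
          have hlt := U_lt odd q a b ha hna
          exact A_irrel _ _ (pvUnmatched (q ++ [a, b]) odd) _ _ _ (le_refl _) (by omega) (by omega)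
        rw [hstep, bStep_eq, hRHS]
        rcases hchild : (p :: rest).flatMap (childrenOf odd) with _ | ⟨c, cs⟩
        · rw [bLoop_nil]; simp
        · have hmem : c ∈ (p :: rest).flatMap (childrenOf odd) := by rw [hchild]; exact List.mem_cons_self ..
          obtain ⟨q, hq, hcq⟩ := List.mem_flatMap.mp hmem
          obtain ⟨a, b, ha, hna, rfl⟩ := mem_childrenOf hcq
          have hu1 : 1 ≤ u := by
            have := U_lt odd q a b ha hna
            have := hU q hq
            omega
          rw [← hchild]
          apply ih (u-1) (L+2) _ odd dm
          · intro c' hc'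
            obtain ⟨q', hq', hcq'⟩ := List.mem_flatMap.mp hc'
            obtain ⟨a', b', _, _, rfl⟩ := mem_childrenOf hcq'
            simp [hL q' hq']
          · intro c' hc'
            obtain ⟨q', hq', hcq'⟩ := List.mem_flatMap.mp hc'
            obtain ⟨a', b', ha', hna', rfl⟩ := mem_childrenOf hcq'
            have := U_lt odd q' a' b' ha' hna'
            have := hU q' hq'
            omega
          · omega

-- ===== VERDICT (by name: the statement is the Claim_ definition above) =====
theorem backtrack_spec : Claim_equal_backtrack := by
  intro matched odd_nodes dist_matrix _
  unfold Spec_backtrack backtrack backtrack_alt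
  rw [bLoop_eq (pvUnmatched matched odd_nodes + 1) (pvUnmatched matched odd_nodes)
      matched.length [matched] odd_nodes dist_matrix
      (by intro p hp; simp at hp; simp [hp])
      (by intro p hp; simp at hp; simp [hp])
      (by omega)]
  simp
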